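-- pv_equiv track=rewrite | github.com/ehrl1225/Coding_Test | 타겟_넘버.py | minus_list
-- ===== SOURCE A (Python) =====
-- def minus_one(n):
--     matrix = []
--     for i in range(n):
--         matrix.append([-1 if i==j else 1 for j in range(n)])
--     return matrix
--
-- def divide(n, k):
--     div_list = []
--     num_list = [1 for i in range(k-1)]
--     max_num = n-k+1
--     while num_list[0]<=max_num:
--         div_list.append([i for i in num_list] + [n - sum(num_list)])
--         num_list[-1]=num_list[-1]+1
--         for index, num in enumerate(num_list[:0:-1]):
--             real_index = k-index-2
--             if num >= (n- sum(num_list[:real_index])):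
--                 num_list[real_index-1] +=1
--                 num_list[real_index:] = [1 for i in range(k-real_index-1)]
--
--     return div_list
--
-- def minus_list(n, k):
--     minuses = []
--     if k==1:
--         return minus_one(n)
--     else:
--         for i in divide(n,k):
--             matrix = []
--             for j in i[:-1]:
--                 matrix += minus_one(j)[-1]
--
--             for j in minus_one(i[-1]):
--                 minuses.append([i for i in matrix]+j)
--         return minuses
-- ===== SOURCE B (Python) =====
-- # Recursive composition enumerator: builds each sign-row prefix incrementally,
-- # never materialises minus_one matrices for the prefix parts and never visits
-- # the over-run branches A's odometer steps through.
-- def minus_list(n, k):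
--     def row(m, i):
--         return [-1 if j == i else 1 for j in range(m)]
--
--     if k == 1:
--         return [row(n, i) for i in range(n)]
--     res = []
--
--     def go(parts, remaining, prefix):
--         if parts == 1:
--             for i in range(remaining):
--                 res.append(prefix + row(remaining, i))
--         else:
--             for v in range(1, remaining - parts + 2):
--                 go(parts - 1, remaining - v, prefix + [1] * (v - 1) + [-1])
--
--     go(k, n, [])
--     return res
-- ===== Notes on version B (the rewrite author's own statement) =====
-- stated objective: faster
-- what changed: Replaces the imperative odometer over k-1 counters (which re-sums prefixes, rebuilds full minus_one matrices per part, and walks bogus over-run states contributing no rows) by a direct recursive enumeration of positive compositions that extends the shared sign-row prefix incrementally.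
-- outside the precondition, e.g. on minus_list(3, 0): A raises IndexError, B does not finish within the time limit
import Mathlib
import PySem

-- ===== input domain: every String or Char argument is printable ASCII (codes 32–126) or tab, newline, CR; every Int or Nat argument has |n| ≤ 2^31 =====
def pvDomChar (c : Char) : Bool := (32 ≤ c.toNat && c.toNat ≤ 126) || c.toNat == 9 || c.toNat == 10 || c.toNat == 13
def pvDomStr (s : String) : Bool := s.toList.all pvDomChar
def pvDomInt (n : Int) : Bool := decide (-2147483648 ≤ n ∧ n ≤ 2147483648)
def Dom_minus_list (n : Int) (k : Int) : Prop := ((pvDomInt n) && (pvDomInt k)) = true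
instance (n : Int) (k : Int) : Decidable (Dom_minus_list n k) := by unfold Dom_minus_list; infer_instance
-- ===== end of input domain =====

-- B replaces A's odometer over k-1 counters (with its full minus_one matrices and over-run states
-- that contribute no rows) by a direct recursive enumeration of the positive compositions,
-- extending the shared row prefix incrementally; equal return value on Pre_ (k ≥ 1).

-- ===== PORT A =====
def minus_one (n : Int) : List (List Int) :=
  (PySem.List.pyRange 0 n 1).foldl (fun matrix i =>
    matrix ++ [(PySem.List.pyRange 0 n 1).map (fun j => if i == j then (-1 : Int) else 1)]) []

-- one step of the inner `for index, num in enumerate(num_list[:0:-1])` carry loop;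
-- on every reachable call ri = k-index-2 satisfies 1 ≤ ri ≤ k-2, so the .toNat
-- positional arithmetic below is exactly Python's slicing/indexing there
def carryStep (n k : Int) (L : List Int) (p : Int × Int) : List Int :=
  if p.2 ≥ n - (L.take (k - p.1 - 2).toNat).sum then
    (L.take ((k - p.1 - 2).toNat - 1)) ++ [L.getD ((k - p.1 - 2).toNat - 1) 0 + 1]
      ++ List.replicate ((k - 1 - (k - p.1 - 2)).toNat) 1
  else L

def divideBody (n k : Int) (L : List Int) : List Int :=
  let L1 := L.dropLast ++ [L.getLastD 0 + 1]      -- num_list[-1] += 1 (list nonempty on Pre_)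
  -- num_list[:0:-1] is the reversed tail
  (PySem.List.enumerate ((L1.drop 1).reverse) 0).foldl (carryStep n k) L1

-- the while loop, with generous fuel (the loop state strictly increases lexicographically,
-- so it terminates; the fuel is proved sufficient below)
def divideLoop (n k : Int) : Nat → List Int → List (List Int) → List (List Int)
  | 0, _, acc => acc
  | fuel+1, L, acc =>
    if L.headD 0 ≤ n - k + 1 then
      divideLoop n k fuel (divideBody n k L) (acc ++ [L ++ [n - L.sum]])
    else acc

def divideFuel (n k : Int) : Nat := (n.toNat + 2) ^ (k.toNat + 2)

def divide (n k : Int) : List (List Int) :=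
  divideLoop n k (divideFuel n k) (List.replicate (k-1).toNat 1) []

def minus_list (n : Int) (k : Int) : List (List Int) :=
  if k == 1 then minus_one n
  else
    (divide n k).foldl (fun minuses i =>
      -- matrix += minus_one(j)[-1]; every j in i[:-1] is ≥ 1 on Pre_, so the list is nonempty
      let matrix := (i.dropLast).foldl (fun m j => m ++ (minus_one j).getLastD []) []
      (minus_one (i.getLastD 0)).foldl (fun ms j => ms ++ [matrix ++ j]) minuses) []

-- ===== PORT B =====
def altRow (m i : Int) : List Int :=
  (PySem.List.pyRange 0 m 1).map (fun j => if j == i then (-1 : Int) else 1)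

-- Source B's `go(parts, remaining, prefix)` accumulating into `res`; the Nat recursion
-- realises Source B's recursion exactly for every parts = k ≥ 1 admitted by Pre_
def goB : Nat → Int → List Int → List (List Int) → List (List Int)
  | 0, _, _, res => res
  | 1, remaining, pre, res =>
    (PySem.List.pyRange 0 remaining 1).foldl (fun res i => res ++ [pre ++ altRow remaining i]) res
  | (p+2), remaining, pre, res =>
    (PySem.List.pyRange 1 (remaining - ((p : Int) + 2) + 2) 1).foldl
      (fun res v => goB (p+1) (remaining - v) (pre ++ List.replicate (v-1).toNat 1 ++ [-1]) res) res

def minus_list_alt (n : Int) (k : Int) : List (List Int) :=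
  if k == 1 then (PySem.List.pyRange 0 n 1).map (fun i => altRow n i)
  else goB k.toNat n [] []

-- ===== PRECONDITION & SPEC =====
-- Python A raises IndexError (num_list[0] on an empty list) for every k ≤ 0; A returns on all k ≥ 1.
def Pre_minus_list (n : Int) (k : Int) : Prop := 1 ≤ k
instance (n : Int) (k : Int) : Decidable (Pre_minus_list n k) := by unfold Pre_minus_list; infer_instance
def pvWitness_minus_list : Int × Int := (5, 3)

def Spec_minus_list (n : Int) (k : Int) (out : List (List Int)) : Prop := out = minus_list_alt n k
instance (n : Int) (k : Int) (out : List (List Int)) : Decidable (Spec_minus_list n k out) := by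
  unfold Spec_minus_list; infer_instance

-- ===== CLAIM (what is proved, stated in full; the proofs are below) =====
def Claim_equal_minus_list : Prop :=
  ∀ (n : Int) (k : Int), Dom_minus_list n k → Pre_minus_list n k →
    Spec_minus_list n k (minus_list n k)


-- ===== LEMMAS AND PROOFS =====

-- ---- small list helpers ----
def onesL (d : Nat) : List Int := List.replicate d 1

lemma headD_append_ne_nil (p l : List Int) (d : Int) (hp : p ≠ []) :
    (p ++ l).headD d = p.headD d := by
  cases p with
  | nil => exact absurd rfl hp
  | cons a t => rfl

lemma dropLast_append_getLastD (l : List Int) (h : l ≠ []) :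
    l.dropLast ++ [l.getLastD 0] = l := by
  induction l using List.reverseRecOn with
  | nil => exact absurd rfl h
  | append_singleton as x _ => rw [List.dropLast_concat, List.getLastD_concat]

lemma getD_length_sub_one (a : List Int) :
    a.getD (a.length - 1) 0 = a.getLastD 0 := by
  induction a with
  | nil => rfl
  | cons h t ih =>
    cases t with
    | nil => rfl
    | cons b u =>
      simp only [List.getD, List.length_cons, Nat.add_sub_cancel, List.getLastD_cons] at *
      simpa using ih

lemma sum_ge_length (x : List Int) (h : ∀ v ∈ x, (1:Int) ≤ v) :
    (x.length : Int) ≤ x.sum := by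
  induction x with
  | nil => simp
  | cons a t ih =>
    have h1 := h a (by simp)
    have h2 : (t.length : Int) ≤ t.sum := ih (fun v hv => h v (by simp [hv]))
    simp only [List.length_cons, List.sum_cons]
    push_cast; omega

-- ---- the successor of the loop state ----
def cascRev (n : Int) : List Int → List Int
  | [] => []
  | [v] => [v + 1]
  | v :: w :: rest =>
    if v ≥ n - (w :: rest).sum then 1 :: cascRev n (w :: rest) else (v + 1) :: w :: rest

def cascM (n : Int) (p : List Int) : List Int := (cascRev n p.reverse).reverse

def bodySucc (n : Int) (p : List Int) : List Int :=
  match p with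
  | [] => []
  | [h] => [h + 1]
  | _ =>
    if p.getLastD 0 ≥ n - p.dropLast.sum - 1 then cascM n p.dropLast ++ [1]
    else p.dropLast ++ [p.getLastD 0 + 1]

def nextState (n : Int) (d : Nat) (p : List Int) : List Int :=
  match d with
  | 0 => bodySucc n p
  | _+1 => cascM n p ++ onesL d

-- ---- the carry fold is the lexicographic successor ----
lemma foldDead (n k : Int) :
    ∀ (a : List Int) (t : Int) (S : List Int),
      t = k - 1 - a.length →
      a.sum < n → (∀ x ∈ a, 1 ≤ x) → (∃ rest, S = a.dropLast ++ rest) →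
      (PySem.List.enumerate (a.drop 1).reverse t).foldl (carryStep n k) S = S := by
  intro a
  induction a using List.reverseRecOn with
  | nil => intro t S _ _ _ _; simp [PySem.List.enumerate_nil]
  | append_singleton as x ih =>
    intro t S ht hsum hpos hS
    cases as with
    | nil => simp [PySem.List.enumerate_nil]
    | cons a0 as0 =>
      obtain ⟨rest, rfl⟩ := hS
      rw [List.dropLast_concat] at *
      have ht' : t = k - 3 - as0.length := by
        simp only [List.length_append, List.length_cons, List.length_nil] at ht; push_cast at ht ⊢; omega
      have hsum' : a0 + as0.sum + x < n := by
        simp only [List.sum_append, List.sum_cons, List.sum_nil] at hsum; omega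
      rw [List.drop_append_of_le_length (by simp), List.reverse_concat]
      rw [PySem.List.enumerate_cons, List.foldl_cons]
      have hri : (k - t - 2).toNat = (a0 :: as0).length := by
        simp only [List.length_cons]; omega
      have hx : (1:Int) ≤ x := hpos x (by simp)
      have hstep : carryStep n k ((a0 :: as0) ++ rest) (t, x) = (a0 :: as0) ++ rest := by
        simp only [carryStep, hri]
        rw [if_neg]
        rw [List.take_left]
        simp only [List.sum_cons]
        omega
      rw [show a0 :: as0 ++ rest = (a0 :: as0) ++ rest from rfl, hstep]
      refine ih (t+1) _ ?_ ?_ ?_ ?_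
      · simp only [List.length_cons]; push_cast; omega
      · simp only [List.sum_cons]; omega
      · intro v hv; exact hpos v (List.mem_append_left _ hv)
      · refine ⟨(a0 :: as0).getLastD 0 :: rest, ?_⟩
        conv_lhs => rw [← dropLast_append_getLastD (a0 :: as0) (by simp)]
        simp

lemma foldAlive (n k : Int) (K : Nat) (hk : k = (K : Int) + 1) :
    ∀ (a : List Int) (w : Int) (d : Nat) (t : Int),
      a ≠ [] → (∀ x ∈ a, 1 ≤ x) → 1 ≤ w → t = k - 2 - a.length → a.length + 1 + d = K →
      (PySem.List.enumerate (w :: (a.drop 1).reverse) t).foldl (carryStep n k)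
          (a ++ [w + 1] ++ onesL d)
        = cascM n (a ++ [w]) ++ onesL d := by
  intro a
  induction a using List.reverseRecOn with
  | nil => intro w d t h; exact absurd rfl h
  | append_singleton as x ih =>
    intro w d t _ hpos hw ht hlen
    have hx : (1:Int) ≤ x := hpos x (by simp)
    have hsumeq : (as ++ [x]).sum = as.sum + x := by simp
    rw [PySem.List.enumerate_cons, List.foldl_cons]
    have hri : (k - t - 2).toNat = (as ++ [x]).length := by
      simp only [List.length_append, List.length_cons, List.length_nil] at ht ⊢; omega
    have hrep : (k - 1 - (k - t - 2)).toNat = d + 1 := by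
      simp only [List.length_append, List.length_cons, List.length_nil] at ht hlen; omega
    have hSdec : (as ++ [x]) ++ [w + 1] ++ onesL d = as ++ (x :: (w+1) :: onesL d) := by simp
    have htake : (((as ++ [x]) ++ [w + 1] ++ onesL d).take (as ++ [x]).length) = as ++ [x] := by
      rw [List.append_assoc ((as ++ [x])) [w+1] (onesL d)]
      exact List.take_left
    have hcascrev : ((as ++ [x]) ++ [w]).reverse = w :: x :: as.reverse := by simp
    have hrevsum : as.reverse.sum = as.sum := List.sum_reverse_int as
    by_cases hc : w ≥ n - (as ++ [x]).sum
    · -- the carry fires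
      have hstep : carryStep n k ((as ++ [x]) ++ [w + 1] ++ onesL d) (t, w)
          = as ++ [x + 1] ++ onesL (d + 1) := by
        simp only [carryStep, hri]
        rw [htake, if_pos hc, hrep]
        rw [hSdec]
        simp only [List.length_append, List.length_cons, List.length_nil, Nat.add_sub_cancel]
        rw [List.take_left]
        have hg := List.getD_append_right as (x :: (w+1) :: onesL d) 0 as.length (Nat.le_refl _)
        rw [Nat.sub_self] at hg
        rw [hg]
        simp only [List.getD_cons_zero]
        simp [onesL, List.replicate_succ, List.append_assoc]
      rw [hstep]
      have hrhs : cascM n ((as ++ [x]) ++ [w]) ++ onesL d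
          = cascM n (as ++ [x]) ++ onesL (d+1) := by
        unfold cascM
        rw [hcascrev]
        rw [show cascRev n (w :: x :: as.reverse) = 1 :: cascRev n (x :: as.reverse) by
          rw [cascRev]
          rw [if_pos (by simp only [List.sum_cons]; omega)]]
        simp [onesL, List.replicate_succ, List.append_assoc]
      rw [hrhs]
      cases as with
      | nil =>
        simp only [List.nil_append, List.drop_succ_cons, List.drop_nil,
          List.reverse_nil, PySem.List.enumerate_nil, List.foldl_nil]
        unfold cascM
        simp only [List.reverse_cons, List.reverse_nil, List.nil_append]
        rw [show cascRev n [x] = [x+1] from rfl]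
        simp [onesL, List.replicate_succ]
      | cons a0 as0 =>
        rw [List.drop_append_of_le_length (by simp), List.reverse_concat]
        exact ih x (d+1) (t+1) (by simp) (fun v hv => hpos v (List.mem_append_left _ hv)) hx
          (by simp only [List.length_append, List.length_cons, List.length_nil] at ht ⊢; omega)
          (by simp only [List.length_append, List.length_cons, List.length_nil] at hlen ⊢; omega)
    · -- no carry: the rest of the scan is dead
      have hstep : carryStep n k ((as ++ [x]) ++ [w + 1] ++ onesL d) (t, w)
          = (as ++ [x]) ++ [w + 1] ++ onesL d := by
        simp only [carryStep, hri]
        rw [htake, if_neg hc]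
      rw [hstep]
      have hdead := foldDead n k (as ++ [x]) (t+1) ((as ++ [x]) ++ [w + 1] ++ onesL d)
        (by simp only [List.length_append, List.length_cons, List.length_nil] at ht ⊢; omega)
        (by omega) hpos
        ⟨[x, w+1] ++ onesL d, by rw [List.dropLast_concat]; simp⟩
      rw [hdead]
      unfold cascM
      rw [hcascrev]
      rw [show cascRev n (w :: x :: as.reverse) = (w+1) :: x :: as.reverse by
        rw [cascRev]
        rw [if_neg (by simp only [List.sum_cons]; omega)]]
      simp

lemma bodySucc_concat (n : Int) (F : List Int) (l : Int) (hF : F ≠ []) :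
    bodySucc n (F ++ [l]) = if l ≥ n - F.sum - 1 then cascM n F ++ [1] else F ++ [l + 1] := by
  obtain ⟨f0, fs, rfl⟩ : ∃ f0 fs, F = f0 :: fs := by
    cases F with
    | nil => exact absurd rfl hF
    | cons a t => exact ⟨a, t, rfl⟩
  cases fs with
  | nil =>
    simp only [List.cons_append, List.nil_append, bodySucc]
    simp [List.getLastD]
  | cons g gs =>
    have h1 : (f0 :: g :: gs) ++ [l] = f0 :: g :: (gs ++ [l]) := by simp
    have h2 : bodySucc n (f0 :: g :: (gs ++ [l])) =
        if (f0 :: g :: (gs ++ [l])).getLastD 0 ≥ n - (f0 :: g :: (gs ++ [l])).dropLast.sum - 1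
        then cascM n (f0 :: g :: (gs ++ [l])).dropLast ++ [1]
        else (f0 :: g :: (gs ++ [l])).dropLast ++ [(f0 :: g :: (gs ++ [l])).getLastD 0 + 1] := rfl
    rw [h1, h2, ← h1, List.dropLast_concat, List.getLastD_concat]

lemma body_eq_bodySucc (n k : Int) (K : Nat) (hk : k = (K : Int) + 1) (hK : 1 ≤ K)
    (L : List Int) (hlen : L.length = K) (hpos : ∀ x ∈ L, 1 ≤ x) :
    divideBody n k L = bodySucc n L := by
  have hL : L ≠ [] := by intro h; rw [h] at hlen; simp at hlen; omega
  obtain ⟨F, l, rfl⟩ : ∃ F l, L = F ++ [l] := by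
    induction L using List.reverseRecOn with
    | nil => exact absurd rfl hL
    | append_singleton as x _ => exact ⟨as, x, rfl⟩
  have hl1 : (1:Int) ≤ l := hpos l (by simp)
  simp only [divideBody, List.dropLast_concat, List.getLastD_concat]
  cases F with
  | nil =>
    simp only [List.nil_append, List.drop_succ_cons, List.drop_nil, List.reverse_nil,
      PySem.List.enumerate_nil, List.foldl_nil]
    rfl
  | cons f0 fs =>
    set F := f0 :: fs with hF
    have hFne : F ≠ [] := by simp [hF]
    have hFlen : F.length + 1 = K := by
      simp only [List.length_append, List.length_cons, List.length_nil] at hlen; omega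
    have hdrop : (F ++ [l + 1]).drop 1 = F.drop 1 ++ [l + 1] :=
      List.drop_append_of_le_length (by simp [hF])
    rw [hdrop, List.reverse_concat, PySem.List.enumerate_cons, List.foldl_cons]
    have hri : (k - 0 - 2).toNat = F.length := by
      simp only [hF, List.length_cons] at hFlen ⊢; omega
    have htake : ((F ++ [l + 1]).take F.length) = F := List.take_left
    have hFsumpos : (1:Int) ≤ f0 := hpos f0 (by simp [hF])
    by_cases hc : l + 1 ≥ n - F.sum
    · -- carry into the counters
      have hstep : carryStep n k (F ++ [l + 1]) (0, l + 1)
          = F.dropLast ++ [F.getLastD 0 + 1] ++ [1] := by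
        simp only [carryStep, hri]
        rw [htake, if_pos hc]
        have hg := List.getD_append F [l+1] 0 (F.length - 1)
          (by simp [hF])
        rw [hg, getD_length_sub_one]
        rw [List.take_append_of_le_length (by omega), ← List.dropLast_eq_take]
        have : (k - 1 - (k - 0 - 2)).toNat = 1 := by omega
        rw [this]
        rfl
      rw [hstep]
      rw [bodySucc_concat n F l hFne, if_pos (by omega)]
      cases fs with
      | nil =>
        simp only [hF, List.drop_succ_cons, List.drop_nil, List.reverse_nil,
          PySem.List.enumerate_nil, List.foldl_nil]
        simp [cascM, cascRev, onesL]
      | cons g gs =>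
        have hdl : F.dropLast ≠ [] := by simp [hF]
        have hd2 : F.drop 1 = F.dropLast.drop 1 ++ [F.getLastD 0] := by
          conv_lhs => rw [← dropLast_append_getLastD F hFne]
          exact List.drop_append_of_le_length (by cases hdl' : F.dropLast <;> simp_all)
        rw [hd2, List.reverse_concat]
        have hres := foldAlive n k K hk F.dropLast (F.getLastD 0) 1 1
          hdl
          (fun v hv => hpos v (List.mem_append_left _ (List.dropLast_subset _ hv)))
          (hpos (F.getLastD 0) (by
            rw [← dropLast_append_getLastD F hFne]
            exact List.mem_append_left _ (List.mem_append_right _ (by simp))))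
          (by
            have : F.dropLast.length = F.length - 1 := by simp
            simp only [this]
            simp only [hF, List.length_cons] at hFlen ⊢
            push_cast; omega)
          (by
            have : F.dropLast.length = F.length - 1 := by simp
            rw [this]
            simp only [hF, List.length_cons] at hFlen ⊢; omega)
        rw [show (onesL 1 : List Int) = [1] from rfl] at hres
        rw [show ((0:Int) + 1) = 1 from rfl, hres, dropLast_append_getLastD F hFne]
    · -- no carry at all
      have hstep : carryStep n k (F ++ [l + 1]) (0, l + 1) = F ++ [l + 1] := by
        simp only [carryStep, hri]
        rw [htake, if_neg hc]
      rw [hstep]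
      have hdead := foldDead n k F 1 (F ++ [l + 1])
        (by simp only [hF, List.length_cons] at hFlen ⊢; push_cast; omega)
        (by omega)
        (fun v hv => hpos v (List.mem_append_left _ hv))
        ⟨[F.getLastD 0, l + 1], by
          conv_lhs => rw [← dropLast_append_getLastD F hFne]
          simp⟩
      rw [show ((0:Int) + 1) = 1 from rfl, hdead, bodySucc_concat n F l hFne, if_neg (by omega)]

-- ---- the loop as a pure run, and its block structure ----
def runL (n k : Int) : Nat → List Int → List (List Int)
  | 0, _ => []
  | fuel+1, L =>
    if L.headD 0 ≤ n - k + 1 then (L ++ [n - L.sum]) :: runL n k fuel (divideBody n k L)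
    else []

lemma divideLoop_eq_runL (n k : Int) :
    ∀ (fuel : Nat) (L : List Int) (acc : List (List Int)),
      divideLoop n k fuel L acc = acc ++ runL n k fuel L := by
  intro fuel
  induction fuel with
  | zero => intro L acc; simp [divideLoop, runL]
  | succ f ih =>
    intro L acc
    rw [divideLoop, runL]
    by_cases hc : L.headD 0 ≤ n - k + 1
    · rw [if_pos hc, if_pos hc, ih]
      simp
    · rw [if_neg hc, if_neg hc]
      simp

def vecs (n : Int) : Nat → Int → List (List Int)
  | 0, _ => [[]]
  | 1, s => (PySem.List.pyRange 1 (max 1 (n - s - 1) + 1) 1).map (fun v => [v])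
  | (d+2), s =>
    (PySem.List.pyRange 1 (max 1 (n - s) + 1) 1).flatMap
      (fun v => (vecs n (d+1) (s + v)).map (v :: ·))

lemma vecs_mem (n : Int) : ∀ (d : Nat) (s : Int) (x : List Int), x ∈ vecs n d s →
    x.length = d ∧ ∀ v ∈ x, 1 ≤ v := by
  intro d
  induction d using Nat.strong_induction_on with
  | _ d ih =>
    intro s x hx
    match d with
    | 0 => simp only [vecs, List.mem_singleton] at hx; subst hx; simp
    | 1 =>
      simp only [vecs, List.mem_map] at hx
      obtain ⟨v, hv, rfl⟩ := hx
      rw [PySem.List.mem_pyRange_one] at hv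
      refine ⟨rfl, ?_⟩; intro w hw; simp at hw; omega
    | (e+2) =>
      simp only [vecs, List.mem_flatMap, List.mem_map] at hx
      obtain ⟨v, hv, y, hy, rfl⟩ := hx
      rw [PySem.List.mem_pyRange_one] at hv
      obtain ⟨hl, hp⟩ := ih (e+1) (by omega) _ _ hy
      refine ⟨by simp [hl], ?_⟩
      intro w hw
      rcases List.mem_cons.mp hw with rfl | hw
      · omega
      · exact hp w hw

lemma blockLast (n k : Int) (K : Nat) (hk : k = (K : Int) + 1) (p : List Int) (s : Int)
    (hp : p ≠ []) (hpos : ∀ x ∈ p, 1 ≤ x) (hhead : p.headD 0 ≤ n - k + 1)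
    (hlen : p.length + 1 = K) (hs : s = p.sum) :
    ∀ (v : Int) (fuel : Nat), 1 ≤ v → v ≤ max 1 (n - s - 1) →
      runL n k ((PySem.List.pyRange v (max 1 (n - s - 1) + 1) 1).length + fuel) (p ++ [v])
        = (PySem.List.pyRange v (max 1 (n - s - 1) + 1) 1).map (fun w => p ++ [w] ++ [n - s - w])
            ++ runL n k fuel (cascM n p ++ [1]) := by
  intro v fuel hv hvB
  generalize hm : (max 1 (n - s - 1) - v).toNat = m
  induction m generalizing v fuel with
  | zero =>
    have hveq : v = max 1 (n - s - 1) := by omega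
    have hone : PySem.List.pyRange v (max 1 (n - s - 1) + 1) 1 = [v] := by
      rw [hveq]; exact PySem.List.pyRange_one_singleton _
    rw [hone]
    simp only [List.length_cons, List.length_nil, List.map_cons, List.map_nil]
    rw [show 0 + 1 + fuel = fuel + 1 by omega, runL]
    rw [if_pos (by rw [headD_append_ne_nil _ _ _ hp]; exact hhead)]
    have hbody : divideBody n k (p ++ [v]) = cascM n p ++ [1] := by
      rw [body_eq_bodySucc n k K hk (by omega) _ (by simp; omega)
        (by intro x hx; rcases List.mem_append.mp hx with h | h
            · exact hpos x h
            · simp at h; omega)]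
      rw [bodySucc_concat n p v hp, if_pos (by omega)]
    rw [hbody]
    have hsum : (p ++ [v]).sum = s + v := by simp [hs]
    simp [hsum]
    rw [show n - (s + v) = n - s - v by ring]
  | succ m' ih =>
    have hvlt : v < max 1 (n - s - 1) := by omega
    rw [PySem.List.pyRange_one_cons (by omega)]
    simp only [List.length_cons, List.map_cons]
    rw [show (PySem.List.pyRange (v+1) (max 1 (n - s - 1) + 1) 1).length + 1 + fuel
        = ((PySem.List.pyRange (v+1) (max 1 (n - s - 1) + 1) 1).length + fuel) + 1 by omega, runL]
    rw [if_pos (by rw [headD_append_ne_nil _ _ _ hp]; exact hhead)]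
    have hbody : divideBody n k (p ++ [v]) = p ++ [v + 1] := by
      rw [body_eq_bodySucc n k K hk (by omega) _ (by simp; omega)
        (by intro x hx; rcases List.mem_append.mp hx with h | h
            · exact hpos x h
            · simp at h; omega)]
      rw [bodySucc_concat n p v hp, if_neg (by omega)]
    rw [hbody]
    rw [ih (v+1) fuel (by omega) (by omega) (by omega)]
    have hsum : (p ++ [v]).sum = s + v := by simp [hs]
    simp only [hsum, List.cons_append, List.append_assoc]
    rw [show n - (s + v) = n - s - v by ring]

lemma cascM_concat (n : Int) (p : List Int) (v : Int) (hp : p ≠ []) :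
    cascM n (p ++ [v]) = if v ≥ n - p.sum then cascM n p ++ [1] else p ++ [v + 1] := by
  obtain ⟨p0, ps, rfl⟩ : ∃ p0 ps, p = p0 :: ps := by
    cases p with
    | nil => exact absurd rfl hp
    | cons a t => exact ⟨a, t, rfl⟩
  unfold cascM
  rw [List.reverse_concat]
  have hrev : (p0 :: ps).reverse ≠ [] := by simp
  obtain ⟨r0, rs, hr⟩ : ∃ r0 rs, (p0 :: ps).reverse = r0 :: rs := by
    cases hrc : (p0 :: ps).reverse with
    | nil => exact absurd hrc hrev
    | cons a t => exact ⟨a, t, rfl⟩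
  rw [hr]
  rw [show cascRev n (v :: r0 :: rs) =
      if v ≥ n - (r0 :: rs).sum then 1 :: cascRev n (r0 :: rs) else (v + 1) :: r0 :: rs from rfl]
  have hsum : (r0 :: rs).sum = (p0 :: ps).sum := by
    rw [← hr]; exact List.sum_reverse_int _
  rw [hsum]
  by_cases hc : v ≥ n - (p0 :: ps).sum
  · rw [if_pos hc, if_pos hc]
    simp [hr]
  · rw [if_neg hc, if_neg hc]
    have : (r0 :: rs).reverse = p0 :: ps := by rw [← hr]; simp
    simp [this]

lemma blockRun (n k : Int) (K : Nat) (hk : k = (K : Int) + 1) :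
    ∀ (d : Nat) (p : List Int) (s : Int) (fuel : Nat),
      p ≠ [] → (∀ x ∈ p, 1 ≤ x) → p.headD 0 ≤ n - k + 1 → p.length + d = K → s = p.sum →
      runL n k ((vecs n d s).length + fuel) (p ++ onesL d)
        = (vecs n d s).map (fun x => p ++ x ++ [n - s - x.sum])
            ++ runL n k fuel (nextState n d p) := by
  intro d
  induction d using Nat.strong_induction_on with
  | _ d ihd =>
    intro p s fuel hp hpos hhead hlen hs
    match d with
    | 0 =>
      rw [show (vecs n 0 s).length = 1 from rfl]
      rw [show 1 + fuel = fuel + 1 by omega, runL]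
      rw [show (p ++ onesL 0) = p by simp [onesL]]
      rw [if_pos (by exact hhead)]
      rw [body_eq_bodySucc n k K hk
        (by have := List.length_pos_of_ne_nil hp; omega) p (by omega) hpos]
      rw [show nextState n 0 p = bodySucc n p from rfl]
      simp [vecs, hs]
    | 1 =>
      rw [show (vecs n 1 s).length = (PySem.List.pyRange 1 (max 1 (n - s - 1) + 1) 1).length by
        simp [vecs]]
      rw [show (p ++ onesL 1) = p ++ [1] by simp [onesL]]
      rw [blockLast n k K hk p s hp hpos hhead (by omega) hs 1 fuel (by omega) (by omega)]
      rw [show nextState n 1 p = cascM n p ++ [1] by simp [nextState, onesL]]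
      simp only [vecs, List.map_map]
      congr 1
      refine List.map_congr_left (fun w _ => ?_)
      simp
    | (e+2) =>
      -- inner loop over the first free digit v
      have inner : ∀ (m : Nat) (v : Int) (fuel : Nat), 1 ≤ v → v ≤ max 1 (n - s) →
          (max 1 (n - s) - v).toNat = m →
          runL n k (((PySem.List.pyRange v (max 1 (n - s) + 1) 1).flatMap
              (fun w => (vecs n (e+1) (s + w)).map (w :: ·))).length + fuel)
              (p ++ v :: onesL (e+1))
            = ((PySem.List.pyRange v (max 1 (n - s) + 1) 1).flatMap
                (fun w => (vecs n (e+1) (s + w)).map (w :: ·))).map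
                  (fun x => p ++ x ++ [n - s - x.sum])
              ++ runL n k fuel (cascM n p ++ onesL (e+2)) := by
        intro m
        induction m with
        | zero =>
          intro v fuel hv hvB hm
          have hveq : v = max 1 (n - s) := by omega
          have hone : PySem.List.pyRange v (max 1 (n - s) + 1) 1 = [v] := by
            rw [hveq]; exact PySem.List.pyRange_one_singleton _
          rw [hone]
          simp only [List.flatMap_cons, List.flatMap_nil, List.append_nil]
          have hblock := ihd (e+1) (by omega) (p ++ [v]) (s + v) fuel
            (by simp)
            (by intro x hx; rcases List.mem_append.mp hx with h | h
                · exact hpos x h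
                · simp at h; omega)
            (by rw [headD_append_ne_nil _ _ _ hp]; exact hhead)
            (by simp at hlen ⊢; omega)
            (by simp [hs])
          rw [show p ++ v :: onesL (e+1) = (p ++ [v]) ++ onesL (e+1) by simp]
          rw [show ((vecs n (e+1) (s + v)).map (v :: ·)).length = (vecs n (e+1) (s+v)).length by
            simp]
          rw [hblock]
          rw [show nextState n (e+1) (p ++ [v]) = cascM n (p ++ [v]) ++ onesL (e+1) by
            simp [nextState]]
          rw [cascM_concat n p v hp, if_pos (by omega)]
          rw [show (cascM n p ++ [1]) ++ onesL (e+1) = cascM n p ++ onesL (e+2) by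
            simp [onesL, List.replicate_succ, List.append_assoc]]
          congr 1
          rw [List.map_map]
          refine List.map_congr_left (fun x _ => ?_)
          simp only [Function.comp_apply, List.sum_cons, List.cons_append, List.append_assoc]
          rw [show n - s - (v + x.sum) = n - (s + v) - x.sum by ring]
          simp
        | succ m' ihm =>
          intro v fuel hv hvB hm
          have hvlt : v < max 1 (n - s) := by omega
          rw [PySem.List.pyRange_one_cons (by omega)]
          simp only [List.flatMap_cons, List.length_append, List.map_append]
          have hblock := ihd (e+1) (by omega) (p ++ [v]) (s + v)
            (((PySem.List.pyRange (v+1) (max 1 (n - s) + 1) 1).flatMap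
              (fun w => (vecs n (e+1) (s + w)).map (w :: ·))).length + fuel)
            (by simp)
            (by intro x hx; rcases List.mem_append.mp hx with h | h
                · exact hpos x h
                · simp at h; omega)
            (by rw [headD_append_ne_nil _ _ _ hp]; exact hhead)
            (by simp at hlen ⊢; omega)
            (by simp [hs])
          rw [show p ++ v :: onesL (e+1) = (p ++ [v]) ++ onesL (e+1) by simp]
          rw [show ((vecs n (e+1) (s + v)).map (v :: ·)).length = (vecs n (e+1) (s+v)).length by
            simp]
          rw [show (vecs n (e+1) (s+v)).length
              + ((PySem.List.pyRange (v+1) (max 1 (n - s) + 1) 1).flatMap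
                (fun w => (vecs n (e+1) (s + w)).map (w :: ·))).length + fuel
            = (vecs n (e+1) (s+v)).length
              + (((PySem.List.pyRange (v+1) (max 1 (n - s) + 1) 1).flatMap
                (fun w => (vecs n (e+1) (s + w)).map (w :: ·))).length + fuel) by omega]
          rw [hblock]
          rw [show nextState n (e+1) (p ++ [v]) = cascM n (p ++ [v]) ++ onesL (e+1) by
            simp [nextState]]
          rw [cascM_concat n p v hp, if_neg (by omega)]
          rw [show (p ++ [v+1]) ++ onesL (e+1) = p ++ (v+1) :: onesL (e+1) by simp]
          rw [ihm (v+1) fuel (by omega) (by omega) (by omega)]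
          rw [List.append_assoc]
          congr 1
          rw [List.map_map]
          refine List.map_congr_left (fun x _ => ?_)
          simp only [Function.comp_apply, List.sum_cons, List.cons_append, List.append_assoc]
          rw [show n - s - (v + x.sum) = n - (s + v) - x.sum by ring]
          simp
      have h1 := inner (max 1 (n - s) - 1).toNat 1 fuel (by omega) (by omega) (by omega)
      rw [show (vecs n (e+2) s) = (PySem.List.pyRange 1 (max 1 (n - s) + 1) 1).flatMap
          (fun w => (vecs n (e+1) (s + w)).map (w :: ·)) from rfl]
      rw [show p ++ onesL (e+2) = p ++ 1 :: onesL (e+1) by simp [onesL, List.replicate_succ]]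
      rw [h1]
      rw [show nextState n (e+2) p = cascM n p ++ onesL (e+2) by simp [nextState]]

-- ---- whole-loop characterisation ----
def genFrom (n k : Int) (K : Nat) : Nat → Int → List (List Int)
  | 0, _ => []
  | c+1, h =>
    (vecs n (K-1) h).map (fun x => [h] ++ x ++ [n - h - x.sum]) ++ genFrom n k K c (h + 1)

lemma nextState_single (n : Int) (d : Nat) (h : Int) :
    nextState n d [h] = (h + 1) :: onesL d := by
  cases d with
  | zero => rfl
  | succ e =>
    show cascM n [h] ++ onesL (e+1) = (h + 1) :: onesL (e+1)
    rfl

lemma headRun (n k : Int) (K : Nat) (hk : k = (K : Int) + 1) (hK : 1 ≤ K) :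
    ∀ (c : Nat) (h : Int) (fuel : Nat), 1 ≤ h → h = n - k + 1 + 1 - c →
      runL n k ((genFrom n k K c h).length + fuel) (h :: onesL (K-1)) = genFrom n k K c h := by
  intro c
  induction c with
  | zero =>
    intro h fuel h1 hc
    rw [show (genFrom n k K 0 h).length = 0 from rfl]
    rw [show genFrom n k K 0 h = [] from rfl]
    cases fuel with
    | zero => rfl
    | succ f =>
      rw [show (0 : Nat) + (f+1) = f + 1 by omega, runL, if_neg (by simp; omega)]
  | succ c ih =>
    intro h fuel h1 hc
    have hhead : h ≤ n - k + 1 := by omega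
    rw [show genFrom n k K (c+1) h
        = (vecs n (K-1) h).map (fun x => [h] ++ x ++ [n - h - x.sum]) ++ genFrom n k K c (h + 1)
        from rfl]
    rw [List.length_append, List.length_map]
    have hblock := blockRun n k K hk (K-1) [h] h ((genFrom n k K c (h+1)).length + fuel)
      (by simp) (by intro x hx; simp at hx; omega) (by simpa using hhead)
      (by simp; omega) (by simp)
    rw [show (vecs n (K-1) h).length + ((genFrom n k K c (h+1)).length + fuel)
        = (vecs n (K-1) h).length + (genFrom n k K c (h+1)).length + fuel by omega] at hblock
    rw [show h :: onesL (K-1) = [h] ++ onesL (K-1) by simp]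
    rw [hblock, nextState_single]
    rw [ih (h+1) fuel (by omega) (by omega)]

lemma len_vecs_le (n : Int) : ∀ (d : Nat) (s : Int), 0 ≤ s →
    (vecs n d s).length ≤ (n.toNat + 1) ^ d := by
  intro d
  induction d using Nat.strong_induction_on with
  | _ d ih =>
    intro s hs
    match d with
    | 0 => simp [vecs]
    | 1 =>
      simp only [vecs, List.length_map, PySem.List.length_pyRange_one, pow_one]
      omega
    | (e+2) =>
      simp only [vecs, List.length_flatMap]
      calc ((PySem.List.pyRange 1 (max 1 (n - s) + 1) 1).map
              (fun v => ((vecs n (e+1) (s + v)).map (v :: ·)).length)).sum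
          ≤ ((PySem.List.pyRange 1 (max 1 (n - s) + 1) 1).map
              (fun _ => (n.toNat + 1) ^ (e+1))).sum := by
            apply List.sum_le_sum
            intro v hv
            rw [PySem.List.mem_pyRange_one] at hv
            rw [List.length_map]
            exact ih (e+1) (by omega) _ (by omega)
        _ ≤ (n.toNat + 1) ^ (e + 2) := by
            rw [List.map_const', List.sum_replicate, PySem.List.length_pyRange_one]
            have h2 : (max 1 (n - s) + 1 - 1).toNat ≤ n.toNat + 1 := by omega
            calc (max 1 (n - s) + 1 - 1).toNat * (n.toNat + 1)^(e+1)
                ≤ (n.toNat + 1) * (n.toNat + 1)^(e+1) := Nat.mul_le_mul_right _ h2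
              _ = (n.toNat + 1) ^ (e+2) := by ring

lemma len_genFrom_le (n k : Int) (K : Nat) :
    ∀ (c : Nat) (h : Int), 1 ≤ h →
      (genFrom n k K c h).length ≤ c * (n.toNat + 1) ^ (K-1) := by
  intro c
  induction c with
  | zero => intro h _; simp [genFrom]
  | succ c ih =>
    intro h h1
    rw [show genFrom n k K (c+1) h
        = (vecs n (K-1) h).map (fun x => [h] ++ x ++ [n - h - x.sum]) ++ genFrom n k K c (h + 1)
        from rfl]
    rw [List.length_append, List.length_map]
    have h2 := len_vecs_le n (K-1) h (by omega)
    have h3 := ih (h+1) (by omega)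
    calc (vecs n (K-1) h).length + (genFrom n k K c (h+1)).length
        ≤ (n.toNat + 1) ^ (K-1) + c * (n.toNat + 1) ^ (K-1) := Nat.add_le_add h2 h3
      _ = (c+1) * (n.toNat + 1) ^ (K-1) := by ring

lemma divide_eq_genFrom (n k : Int) (K : Nat) (hk : k = (K : Int) + 1) (hK : 1 ≤ K) :
    divide n k = genFrom n k K (n - k + 1).toNat 1 := by
  unfold divide
  rw [divideLoop_eq_runL, List.nil_append]
  have hones : List.replicate (k-1).toNat 1 = (1 : Int) :: onesL (K-1) := by
    rw [show (k-1).toNat = K by omega]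
    rw [show K = (K-1) + 1 by omega, List.replicate_succ]
    rfl
  rw [hones]
  by_cases hmax : n - k + 1 ≤ 0
  · rw [show (n - k + 1).toNat = 0 by omega]
    rw [show genFrom n k K 0 1 = [] from rfl]
    cases hf : divideFuel n k with
    | zero => rfl
    | succ f => rw [runL, if_neg (by simp; omega)]
  · have hc1 : (1:Int) = n - k + 1 + 1 - (n - k + 1).toNat := by omega
    have hlen : (genFrom n k K (n - k + 1).toNat 1).length ≤ divideFuel n k := by
      have h1 := len_genFrom_le n k K (n - k + 1).toNat 1 (by omega)
      have h2 : (n - k + 1).toNat ≤ n.toNat + 1 := by omega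
      have h3 : (n - k + 1).toNat * (n.toNat + 1) ^ (K-1) ≤ (n.toNat + 1) * (n.toNat + 1) ^ (K-1) :=
        Nat.mul_le_mul_right _ h2
      have h4 : (n.toNat + 1) * (n.toNat + 1) ^ (K-1) = (n.toNat + 1) ^ K := by
        rw [← pow_succ']
        congr 1
        omega
      have h5 : (n.toNat + 1) ^ K ≤ (n.toNat + 2) ^ K :=
        Nat.pow_le_pow_left (by omega) K
      have h6 : (n.toNat + 2) ^ K ≤ (n.toNat + 2) ^ (k.toNat + 2) :=
        Nat.pow_le_pow_right (by omega) (by omega)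
      unfold divideFuel
      omega
    have hsplit : divideFuel n k
        = (genFrom n k K (n - k + 1).toNat 1).length + (divideFuel n k
            - (genFrom n k K (n - k + 1).toNat 1).length) := by omega
    rw [hsplit]
    exact headRun n k K hk hK (n - k + 1).toNat 1 _ (by omega) hc1

-- ---- rows ----
def encodeD (x : List Int) : List Int := x.flatMap (fun v => List.replicate (v-1).toNat 1 ++ [-1])

def rowsVec (n : Int) (d : Nat) (s : Int) (pre : List Int) : List (List Int) :=
  (vecs n d s).flatMap (fun x =>
    (PySem.List.pyRange 0 (n - s - x.sum) 1).map
      (fun i => (pre ++ encodeD x) ++ altRow (n - s - x.sum) i))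

lemma minus_one_eq_map (m : Int) :
    minus_one m = (PySem.List.pyRange 0 m 1).map (fun i => altRow m i) := by
  unfold minus_one altRow
  rw [PySem.List.foldl_append_singleton_eq_map]
  simp only [List.nil_append]
  refine List.map_congr_left (fun i _ => ?_)
  refine List.map_congr_left (fun j _ => ?_)
  simp only [beq_iff_eq]
  split_ifs with h1 h2 <;> first | rfl | omega

lemma minus_one_last (m : Int) (hm : 1 ≤ m) :
    (minus_one m).getLastD [] = List.replicate (m-1).toNat 1 ++ [-1] := by
  rw [minus_one_eq_map]
  rw [show m = (m-1) + 1 by ring, PySem.List.pyRange_one_succ_right (by omega)]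
  rw [List.map_append]
  simp only [List.map_cons, List.map_nil]
  rw [List.getLastD_concat]
  unfold altRow
  rw [show (m - 1 + 1) = m by ring]
  rw [show m = (m-1) + 1 by ring, PySem.List.pyRange_one_succ_right (by omega), List.map_append]
  congr 1
  · rw [List.map_congr_left (g := fun _ => (1:Int)) ?_]
    · rw [List.map_const', PySem.List.length_pyRange_one]; norm_num
    · intro j hj
      rw [PySem.List.mem_pyRange_one] at hj
      simp only [beq_iff_eq]
      rw [if_neg (by omega)]
  · simp

lemma matrix_foldl (ds : List Int) :
    ∀ (acc : List Int), (∀ v ∈ ds, (1:Int) ≤ v) →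
      ds.foldl (fun m j => m ++ (minus_one j).getLastD []) acc = acc ++ encodeD ds := by
  induction ds with
  | nil => intro acc _; simp [encodeD]
  | cons a t ih =>
    intro acc h
    simp only [List.foldl_cons]
    rw [ih _ (fun v hv => h v (by simp [hv])), minus_one_last a (h a (by simp))]
    simp [encodeD, List.append_assoc]

lemma rowsVec_nil (n : Int) : ∀ (d : Nat) (s : Int) (pre : List Int), (n - s ≤ (d : Int)) →
    rowsVec n d s pre = [] := by
  intro d s pre h
  unfold rowsVec
  rw [List.flatMap_eq_nil_iff.mpr]
  intro x hx
  obtain ⟨hlx, hpx⟩ := vecs_mem n d s x hx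
  have hsum : (d : Int) ≤ x.sum := by
    have := sum_ge_length x hpx
    rw [hlx] at this
    exact this
  rw [PySem.List.pyRange_one_eq_nil (by omega)]
  rfl

lemma encodeD_cons (v : Int) (x : List Int) :
    encodeD (v :: x) = (List.replicate (v-1).toNat 1 ++ [-1]) ++ encodeD x := by
  simp [encodeD]

lemma rowsVec_step (n : Int) (e : Nat) (s : Int) (pre : List Int) :
    rowsVec n (e+2) s pre
      = (PySem.List.pyRange 1 (max 1 (n - s) + 1) 1).flatMap
          (fun v => rowsVec n (e+1) (s + v) (pre ++ (List.replicate (v-1).toNat 1 ++ [-1]))) := by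
  unfold rowsVec
  rw [show vecs n (e+2) s = (PySem.List.pyRange 1 (max 1 (n - s) + 1) 1).flatMap
      (fun v => (vecs n (e+1) (s + v)).map (v :: ·)) from rfl]
  rw [List.flatMap_assoc]
  congr 1
  funext v
  rw [List.flatMap_map]
  refine List.flatMap_congr (fun x _ => ?_)
  simp only [Function.comp_apply, List.sum_cons, encodeD_cons,
    show ∀ a b : Int, n - s - (a + b) = n - (s + a) - b from fun a b => by ring]
  simp [List.append_assoc]

lemma goB_eq_rowsVec (n : Int) : ∀ (d : Nat) (s : Int) (pre : List Int) (res : List (List Int)),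
    goB (d+1) (n - s) pre res = res ++ rowsVec n d s pre := by
  intro d
  induction d using Nat.strong_induction_on with
  | _ d ih =>
    intro s pre res
    match d with
    | 0 =>
      rw [show goB 1 (n - s) pre res = (PySem.List.pyRange 0 (n - s) 1).foldl
          (fun res i => res ++ [pre ++ altRow (n - s) i]) res from rfl]
      rw [PySem.List.foldl_append_singleton_eq_map]
      unfold rowsVec
      simp [vecs, encodeD]
    | (e+1) =>
      rw [show goB (e+2) (n - s) pre res = (PySem.List.pyRange 1 ((n - s) - ((e : Int) + 2) + 2) 1).foldl
          (fun res v => goB (e+1) ((n - s) - v) (pre ++ List.replicate (v-1).toNat 1 ++ [-1]) res) res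
          from rfl]
      have hre : (n - s) - ((e : Int) + 2) + 2 = n - s - e := by ring
      rw [hre]
      have hbody : ∀ (res' : List (List Int)) (v : Int), v ∈ PySem.List.pyRange 1 (n - s - e) 1 →
          goB (e+1) ((n - s) - v) (pre ++ List.replicate (v-1).toNat 1 ++ [-1]) res'
            = res' ++ rowsVec n e (s + v) (pre ++ (List.replicate (v-1).toNat 1 ++ [-1])) := by
        intro res' v _
        rw [show (n - s) - v = n - (s + v) by ring]
        rw [ih e (by omega) (s + v) _ res']
        simp [List.append_assoc]
      rw [PySem.List.foldl_congr_mem _ _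
        (fun res v => res ++ rowsVec n e (s + v) (pre ++ (List.replicate (v-1).toNat 1 ++ [-1]))) _
        (fun acc v hv => hbody acc v hv)]
      rw [PySem.List.foldl_append_eq_flatMap]
      congr 1
      -- compare the enumeration ranges
      match e with
      | 0 =>
        by_cases hns : 2 ≤ n - s
        · unfold rowsVec
          rw [show vecs n 1 s = (PySem.List.pyRange 1 (max 1 (n - s - 1) + 1) 1).map
              (fun v => [v]) from rfl]
          rw [List.flatMap_map]
          rw [show max 1 (n - s - 1) + 1 = n - s - 0 by omega]
          refine List.flatMap_congr (fun v _ => ?_)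
          simp [rowsVec, vecs, encodeD, List.append_assoc,
            show ∀ b : Int, n - s - (b + 0) = n - (s + b) - 0 from fun b => by ring,
            show ∀ b : Int, n - (s + b) - 0 = n - s - b from fun b => by ring]
        · rw [PySem.List.pyRange_one_eq_nil (by omega)]
          unfold rowsVec
          rw [show vecs n 1 s = (PySem.List.pyRange 1 (max 1 (n - s - 1) + 1) 1).map
              (fun v => [v]) from rfl]
          rw [show max 1 (n - s - 1) + 1 = 2 by omega]
          rw [show PySem.List.pyRange 1 2 1 = [1] from rfl]
          simp only [List.map_cons, List.map_nil, List.flatMap_cons, List.flatMap_nil]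
          rw [PySem.List.pyRange_one_eq_nil (by simp; omega)]
          simp
      | (g+1) =>
        rw [rowsVec_step]
        by_cases hns : (1:Int) ≤ n - s - (g+1) - 1
        · have hmax : max 1 (n - s) = n - s := by omega
          rw [hmax]
          rw [PySem.List.pyRange_one_append 1 (n - s - (g+1)) (n - s + 1) (by omega) (by omega)]
          rw [List.flatMap_append]
          have hnil : (PySem.List.pyRange (n - s - (g+1)) (n - s + 1) 1).flatMap
              (fun v => rowsVec n (g+1) (s + v) (pre ++ (List.replicate (v-1).toNat 1 ++ [-1])))
              = [] := by
            rw [List.flatMap_eq_nil_iff.mpr]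
            intro v hv
            rw [PySem.List.mem_pyRange_one] at hv
            exact rowsVec_nil n (g+1) (s+v) _ (by push_cast; omega)
          rw [hnil, List.append_nil]
          rfl
        · rw [PySem.List.pyRange_one_eq_nil (by push_cast; omega)]
          simp only [List.flatMap_nil]
          symm
          rw [List.flatMap_eq_nil_iff]
          intro v hv
          rw [PySem.List.mem_pyRange_one] at hv
          exact rowsVec_nil n (g+1) (s+v) _ (by push_cast; omega)

-- ---- assembling the two sides ----
lemma minus_list_flatRows (n k : Int) (ts : List (List Int))
    (hts : ∀ t ∈ ts, t ≠ [] ∧ ∀ v ∈ t.dropLast, (1:Int) ≤ v) :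
    ∀ (acc : List (List Int)),
      ts.foldl (fun minuses i =>
        let matrix := (i.dropLast).foldl (fun m j => m ++ (minus_one j).getLastD []) []
        (minus_one (i.getLastD 0)).foldl (fun ms j => ms ++ [matrix ++ j]) minuses) acc
      = acc ++ ts.flatMap (fun t =>
          (PySem.List.pyRange 0 (t.getLastD 0) 1).map
            (fun i => encodeD t.dropLast ++ altRow (t.getLastD 0) i)) := by
  induction ts with
  | nil => intro acc; simp
  | cons t ts' ih =>
    intro acc
    obtain ⟨hne, hposd⟩ := hts t (by simp)
    rw [List.foldl_cons]
    simp only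
    rw [matrix_foldl t.dropLast [] hposd, List.nil_append]
    rw [PySem.List.foldl_append_singleton_eq_map]
    rw [ih (fun t ht => hts t (by simp [ht])) _]
    rw [List.flatMap_cons, minus_one_eq_map, List.map_map]
    simp [List.append_assoc]

lemma genFrom_mem (n k : Int) (K : Nat) :
    ∀ (c : Nat) (h : Int), 1 ≤ h → ∀ t ∈ genFrom n k K c h,
      t ≠ [] ∧ ∀ v ∈ t.dropLast, (1:Int) ≤ v := by
  intro c
  induction c with
  | zero => intro h _ t ht; simp [genFrom] at ht
  | succ c ih =>
    intro h h1 t ht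
    rw [show genFrom n k K (c+1) h
        = (vecs n (K-1) h).map (fun x => [h] ++ x ++ [n - h - x.sum]) ++ genFrom n k K c (h + 1)
        from rfl] at ht
    rcases List.mem_append.mp ht with hb | hr
    · simp only [List.mem_map] at hb
      obtain ⟨x, hx, rfl⟩ := hb
      obtain ⟨hlx, hpx⟩ := vecs_mem n (K-1) h x hx
      constructor
      · simp
      · rw [show [h] ++ x ++ [n - h - x.sum] = (h :: x) ++ [n - h - x.sum] by simp,
          List.dropLast_concat]
        intro v hv
        rcases List.mem_cons.mp hv with rfl | hv
        · exact h1
        · exact hpx v hv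
    · exact ih (h+1) (by omega) t hr

lemma top_fold (n k : Int) (K : Nat) (hk : k = (K : Int) + 1) (hK : 1 ≤ K) :
    ∀ (c : Nat) (h : Int) (res : List (List Int)), 1 ≤ h → h = n - k + 1 + 1 - c →
      (PySem.List.pyRange h (n - k + 1 + 1) 1).foldl
        (fun res v => goB K (n - v) (List.replicate (v-1).toNat 1 ++ [-1]) res) res
      = res ++ (genFrom n k K c h).flatMap (fun t =>
          (PySem.List.pyRange 0 (t.getLastD 0) 1).map
            (fun i => encodeD t.dropLast ++ altRow (t.getLastD 0) i)) := by
  intro c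
  induction c with
  | zero =>
    intro h res h1 hc
    rw [PySem.List.pyRange_one_eq_nil (by omega)]
    simp [genFrom]
  | succ c ih =>
    intro h res h1 hc
    rw [PySem.List.pyRange_one_cons (by omega), List.foldl_cons]
    have hKe : K = (K - 1) + 1 := by omega
    have hstep : goB K (n - h) (List.replicate (h-1).toNat 1 ++ [-1]) res
        = res ++ rowsVec n (K-1) h (List.replicate (h-1).toNat 1 ++ [-1]) := by
      rw [hKe]
      exact goB_eq_rowsVec n (K-1) h _ res
    rw [hstep]
    rw [ih (h+1) _ (by omega) (by omega)]
    rw [show genFrom n k K (c+1) h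
        = (vecs n (K-1) h).map (fun x => [h] ++ x ++ [n - h - x.sum]) ++ genFrom n k K c (h + 1)
        from rfl]
    rw [List.flatMap_append, List.append_assoc]
    congr 2
    rw [List.flatMap_map]
    unfold rowsVec
    refine List.flatMap_congr (fun x _ => ?_)
    rw [show [h] ++ x ++ [n - h - x.sum] = (h :: x) ++ [n - h - x.sum] by simp,
      List.dropLast_concat, List.getLastD_concat]
    rw [encodeD_cons]


-- ===== VERDICT (by name: the statement is the Claim_ definition above) =====
theorem minus_list_spec : Claim_equal_minus_list := by
  intro n k _ hpre
  have hk1 : (1:Int) ≤ k := hpre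
  unfold Spec_minus_list
  by_cases h1 : k = 1
  · subst h1
    unfold minus_list minus_list_alt
    rw [if_pos (by simp), if_pos (by simp)]
    exact minus_one_eq_map n
  · obtain ⟨e, hke⟩ : ∃ e : Nat, k = (e:Int) + 2 := ⟨(k-2).toNat, by omega⟩
    have hkK : k = ((e + 1 : Nat) : Int) + 1 := by push_cast; omega
    unfold minus_list minus_list_alt
    rw [if_neg (by simpa using h1), if_neg (by simpa using h1)]
    rw [divide_eq_genFrom n k (e+1) hkK (by omega)]
    rw [minus_list_flatRows n k _ (genFrom_mem n k (e+1) _ 1 (by omega)) []]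
    rw [List.nil_append]
    have hkt : k.toNat = e + 2 := by omega
    rw [hkt]
    rw [show goB (e+2) n [] []
        = (PySem.List.pyRange 1 (n - ((e : Int) + 2) + 2) 1).foldl
            (fun res v => goB (e+1) (n - v) ([] ++ List.replicate (v-1).toNat 1 ++ [-1]) res) []
        from rfl]
    simp only [List.nil_append]
    rw [show n - ((e : Int) + 2) + 2 = n - k + 1 + 1 by omega]
    by_cases hmax : n - k + 1 ≤ 0
    · rw [show (n - k + 1).toNat = 0 by omega]
      rw [show genFrom n k (e+1) 0 1 = [] from rfl]
      rw [PySem.List.pyRange_one_eq_nil (by omega)]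
      simp
    · rw [top_fold n k (e+1) hkK (by omega) (n - k + 1).toNat 1 [] (by omega) (by omega)]
      rw [List.nil_append]
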